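-- pv_equiv track=rewrite | github.com/MaxwellM34/CopperCRM | mautic/scripts/analyzer/helpers_clarity.py | count_cta_phrases
-- ===== SOURCE A (Python) =====
-- from typing import List, Set, Optional
--
-- def count_cta_phrases(
--     text: str,
--     cta_phrases: List[str],
--     include_question_marks: bool = True,
--     max_question_mark_bonus: int = 2,
-- ) -> int:
--     """
--     Count CTA phrases in the text, with an optional small bonus for question marks.
--     Intended for clarity / focus scoring.
--     """
--     if not text:
--         return 0
--
--     lowered = text.lower()
--     count = 0
--
--     for phrase in cta_phrases:
--         p = phrase.lower()
--         if p and p in lowered: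
--             count += 1
--
--     if include_question_marks:
--         count += min(lowered.count("?"), max_question_mark_bonus)
--
--     return count
-- ===== SOURCE B (Python) =====
-- from typing import List
--
--
-- def count_cta_phrases(
--     text: str,
--     cta_phrases: List[str],
--     include_question_marks: bool = True,
--     max_question_mark_bonus: int = 2,
-- ) -> int:
--     # Single left-to-right scan over the text: at each position, try to match
--     # every still-unmatched phrase; a matched phrase leaves the pending pool,
--     # and the scan stops as soon as the pool is empty.
--     if not text:
--         return 0
--
--     lowered = text.lower()
--     pending = [p for p in (ph.lower() for ph in cta_phrases) if p]
--     matched = 0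
--
--     for i in range(len(lowered)):
--         if not pending:
--             break
--         still_pending = []
--         for p in pending:
--             if lowered.startswith(p, i):
--                 matched += 1
--             else:
--                 still_pending.append(p)
--         pending = still_pending
--
--     if include_question_marks:
--         matched += min(lowered.count("?"), max_question_mark_bonus)
--
--     return matched
-- ===== Notes on version B (the rewrite author's own statement) =====
-- stated objective: alternative
-- what changed: Replaces the per-phrase full-text substring search ('p in lowered' for every phrase) by one left-to-right scan of the text that tries each still-unmatched phrase at each position, removes a phrase from the pending pool the moment it matches, and stops early once the pool is empty.
import Mathlib
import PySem

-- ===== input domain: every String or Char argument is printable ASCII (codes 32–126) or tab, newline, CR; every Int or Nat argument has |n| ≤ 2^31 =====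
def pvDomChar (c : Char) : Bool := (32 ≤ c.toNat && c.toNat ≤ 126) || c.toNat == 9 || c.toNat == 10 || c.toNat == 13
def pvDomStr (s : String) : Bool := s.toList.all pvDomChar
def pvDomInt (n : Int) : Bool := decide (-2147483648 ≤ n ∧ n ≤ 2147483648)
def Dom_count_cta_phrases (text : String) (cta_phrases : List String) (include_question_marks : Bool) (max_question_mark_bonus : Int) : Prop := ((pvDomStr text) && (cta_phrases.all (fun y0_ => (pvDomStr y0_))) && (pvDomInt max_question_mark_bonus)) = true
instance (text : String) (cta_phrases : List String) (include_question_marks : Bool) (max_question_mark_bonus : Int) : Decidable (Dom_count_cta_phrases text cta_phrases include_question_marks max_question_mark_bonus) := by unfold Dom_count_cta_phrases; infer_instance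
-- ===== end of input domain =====

-- B replaces the per-phrase full-text substring search by a single left-to-right
-- scan of the text with a pending pool of unmatched phrases (objective: alternative).

-- ===== PORT A =====
def count_cta_phrases (text : String) (cta_phrases : List String) (include_question_marks : Bool) (max_question_mark_bonus : Int) : Int :=
  if text = "" then 0
  else
    let lowered := PySem.Chars.lower text.toList
    let count : Int := cta_phrases.foldl (fun c phrase =>
      let p := PySem.Chars.lower phrase.toList
      if p ≠ [] ∧ PySem.Chars.isIn p lowered = true then c + 1 else c) 0
    if include_question_marks then
      count + min ((PySem.Chars.count lowered ['?'] : Int)) max_question_mark_bonus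
    else count

-- ===== PORT B =====
-- inner loop over the pending pool at one text position i
-- (Python's lowered.startswith(p, i) with 0 ≤ i is exactly startswith (lowered.drop i) p)
def pvStepB (lowered : List Char) (i : Nat) (st : Int × List (List Char)) : Int × List (List Char) :=
  st.2.foldl (fun acc p =>
    if PySem.Chars.startswith (lowered.drop i) p then (acc.1 + 1, acc.2)
    else (acc.1, acc.2 ++ [p])) (st.1, ([] : List (List Char)))

-- outer loop 'for i in range(len(lowered))' with the 'if not pending: break'
def pvScanB (lowered : List Char) : List Nat → Int × List (List Char) → Int × List (List Char)
  | [], st => st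
  | i :: rest, st => if st.2 = [] then st else pvScanB lowered rest (pvStepB lowered i st)

def count_cta_phrases_alt (text : String) (cta_phrases : List String) (include_question_marks : Bool) (max_question_mark_bonus : Int) : Int :=
  if text = "" then 0
  else
    let lowered := PySem.Chars.lower text.toList
    let pending := (cta_phrases.map (fun ph => PySem.Chars.lower ph.toList)).filter (fun p => decide (p ≠ []))
    let matched := (pvScanB lowered (List.range lowered.length) (0, pending)).1
    if include_question_marks then
      matched + min ((PySem.Chars.count lowered ['?'] : Int)) max_question_mark_bonus
    else matched

-- ===== PRECONDITION & SPEC =====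
def Spec_count_cta_phrases (text : String) (cta_phrases : List String) (include_question_marks : Bool) (max_question_mark_bonus : Int) (out : Int) : Prop := out = count_cta_phrases_alt text cta_phrases include_question_marks max_question_mark_bonus
instance (text : String) (cta_phrases : List String) (include_question_marks : Bool) (max_question_mark_bonus : Int) (out : Int) : Decidable (Spec_count_cta_phrases text cta_phrases include_question_marks max_question_mark_bonus out) := by unfold Spec_count_cta_phrases; infer_instance

-- ===== CLAIM (what is proved, stated in full; the proofs are below) =====
def Claim_equal_count_cta_phrases : Prop := ∀ (text : String) (cta_phrases : List String) (include_question_marks : Bool) (max_question_mark_bonus : Int), Dom_count_cta_phrases text cta_phrases include_question_marks max_question_mark_bonus → Spec_count_cta_phrases text cta_phrases include_question_marks max_question_mark_bonus (count_cta_phrases text cta_phrases include_question_marks max_question_mark_bonus)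

-- ===== LEMMAS AND PROOFS =====

-- the inner loop counts the prefixes at position i and keeps the non-matches, in order
theorem pvStepB_eq (lowered : List Char) (i : Nat) (pend : List (List Char)) (m : Int) (acc : List (List Char)) :
    pend.foldl (fun acc p =>
      if PySem.Chars.startswith (lowered.drop i) p then (acc.1 + 1, acc.2)
      else (acc.1, acc.2 ++ [p])) (m, acc)
    = (m + (pend.countP (fun p => PySem.Chars.startswith (lowered.drop i) p) : Int),
       acc ++ pend.filter (fun p => !PySem.Chars.startswith (lowered.drop i) p)) := by
  induction pend generalizing m acc with
  | nil => simp
  | cons p t ih =>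
    by_cases h : PySem.Chars.startswith (lowered.drop i) p = true
    · simp [h, ih, add_assoc, add_comm]
    · simp only [Bool.not_eq_true] at h
      simp [h, ih]

-- splitting the infix count at one position of the text
theorem pv_countP_split (c : Char) (t : List Char) (pend : List (List Char))
    (hne : ∀ p ∈ pend, p ≠ []) :
    pend.countP (fun p => PySem.Chars.isIn p (c :: t))
    = pend.countP (fun p => PySem.Chars.startswith (c :: t) p)
      + (pend.filter (fun p => !PySem.Chars.startswith (c :: t) p)).countP
          (fun p => PySem.Chars.isIn p t) := by
  induction pend with
  | nil => simp
  | cons p r ih =>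
    have hp := hne p (by simp)
    have hr : ∀ q ∈ r, q ≠ [] := fun q hq => hne q (by simp [hq])
    by_cases h : PySem.Chars.startswith (c :: t) p = true
    · have hin : PySem.Chars.isIn p (c :: t) = true := by
        rw [PySem.Chars.isIn_iff_infix]
        exact ((PySem.Chars.startswith_iff _ _).1 h).isInfix
      simp [h, hin, ih hr]
      omega
    · simp only [Bool.not_eq_true] at h
      have hiff : PySem.Chars.isIn p (c :: t) = PySem.Chars.isIn p t := by
        by_cases h2 : PySem.Chars.isIn p t = true
        · rw [h2, PySem.Chars.isIn_iff_infix]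
          exact (List.infix_cons_iff.2 (Or.inr ((PySem.Chars.isIn_iff_infix _ _).1 h2)))
        · simp only [Bool.not_eq_true] at h2 ⊢
          rw [h2, PySem.Chars.isIn_eq_false_iff]
          intro hinf
          rcases List.infix_cons_iff.1 hinf with hpre | hinf2
          · exact absurd ((PySem.Chars.startswith_iff _ _).2 hpre) (by simp [h])
          · exact absurd ((PySem.Chars.isIn_iff_infix _ _).2 hinf2) (by simp [h2])
      simp [List.countP_cons, h, hiff, ih hr]
      omega

-- the outer scan, started at position i, counts exactly the pending phrases occurring in lowered.drop i
theorem pvScanB_eq (lowered : List Char) (k i : Nat) (m : Int) (pend : List (List Char))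
    (hik : i + k = lowered.length) (hne : ∀ p ∈ pend, p ≠ []) :
    (pvScanB lowered (List.range' i k) (m, pend)).1
    = m + (pend.countP (fun p => PySem.Chars.isIn p (lowered.drop i)) : Int) := by
  induction k generalizing i m pend with
  | zero =>
    have hd : lowered.drop i = [] := by
      apply List.drop_eq_nil_of_le; omega
    have h0 : pend.countP (fun p => PySem.Chars.isIn p (lowered.drop i)) = 0 := by
      rw [List.countP_eq_zero]
      intro p hp
      rw [hd]
      simp only [Bool.not_eq_true, PySem.Chars.isIn_eq_false_iff]
      intro hinf
      exact hne p hp (List.infix_nil.1 hinf)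
    simp [pvScanB, h0]
  | succ k ih =>
    rw [List.range'_succ]
    by_cases hp : pend = []
    · simp [pvScanB, hp]
    · have hi : i < lowered.length := by omega
      have hdrop : lowered.drop i = lowered[i] :: lowered.drop (i + 1) :=
        (List.getElem_cons_drop hi).symm
      simp only [pvScanB, hp, pvStepB, pvStepB_eq, List.nil_append, if_false]
      rw [ih (i + 1) _ _ (by omega)
        (fun q hq => hne q (List.mem_filter.1 hq).1)]
      rw [hdrop, pv_countP_split lowered[i] (lowered.drop (i + 1)) pend hne]
      push_cast
      ring

-- ===== VERDICT (by name: the statement is the Claim_ definition above) =====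
theorem count_cta_phrases_spec : Claim_equal_count_cta_phrases := by
  intro text cta inc maxb _
  unfold Spec_count_cta_phrases count_cta_phrases count_cta_phrases_alt
  by_cases ht : text = ""
  · simp [ht]
  · simp only [if_neg ht]
    set lowered := PySem.Chars.lower text.toList with hlow
    have hA : (cta.foldl (fun c phrase =>
        let p := PySem.Chars.lower phrase.toList
        if p ≠ [] ∧ PySem.Chars.isIn p lowered = true then c + 1 else c) (0 : Int))
        = (cta.countP (fun phrase => decide (PySem.Chars.lower phrase.toList ≠ [] ∧
            PySem.Chars.isIn (PySem.Chars.lower phrase.toList) lowered = true)) : Int) := by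
      rw [PySem.List.foldl_ite_add_one]
      simp
    have hB : (pvScanB lowered (List.range lowered.length)
        (0, (cta.map (fun ph => PySem.Chars.lower ph.toList)).filter (fun p => decide (p ≠ [])))).1
        = (((cta.map (fun ph => PySem.Chars.lower ph.toList)).filter (fun p => decide (p ≠ []))).countP
            (fun p => PySem.Chars.isIn p lowered) : Int) := by
      rw [List.range_eq_range', pvScanB_eq lowered lowered.length 0 0 _ (by omega)
        (fun q hq => by simpa using (List.mem_filter.1 hq).2)]
      simp
    have hcnt : ((cta.map (fun ph => PySem.Chars.lower ph.toList)).filter (fun p => decide (p ≠ []))).countP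
        (fun p => PySem.Chars.isIn p lowered)
        = cta.countP (fun phrase => decide (PySem.Chars.lower phrase.toList ≠ [] ∧
            PySem.Chars.isIn (PySem.Chars.lower phrase.toList) lowered = true)) := by
      rw [List.countP_filter, List.countP_map]
      apply List.countP_congr
      intro ph _
      by_cases h1 : PySem.Chars.lower ph.toList = [] <;>
        by_cases h2 : PySem.Chars.isIn (PySem.Chars.lower ph.toList) lowered = true <;>
        simp [Function.comp, h1, h2]
    simp only [hA, hB, hcnt]
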